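-- pv_equiv track=rewrite | github.com/jjsuperpower/Docker-Containers | porkbun-dns/porkbun_ddns.py | parse_domains_file
-- ===== SOURCE A (Python) =====
-- def parse_domains_file(file):
--     # remove empty lines
--     lines = (line.strip() for line in file if line.strip())
--
--     # remove everything after a comment
--     lines = (line.split('#')[0].strip() for line in lines)
--
--     # replace commas with spaces
--     lines = (line.replace(',', ' ') for line in lines)
--
--     # replace all whitespace with a single space
--     lines = (line.replace('\t', ' ') for line in lines)
--     lines = (line.replace('\n', ' ') for line in lines)
--
--     # reduce multiple spaces to one
--     lines = (' '.join(line.split()) for line in lines)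
--
--     # use space as a delimiter
--     lines = (line.split(' ') for line in lines)
--
--     # remove empty lines
--     lines = (line for line in lines if line[0] != '')
--
--     # return [domain, None] if no static ip is specified
--     lines = (line if len(line) == 2 else [line[0], None] for line in lines)
--
--     # subdomain, rootdomain and ip
--     lines = ({'root_domain': '.'.join(line[0].split('.')[-2:]), 'subdomain': '.'.join(line[0].split('.')[:-2]), 'domain': line[0], 'ip': line[1]} for line in lines)
--
--     return list(lines)
-- ===== SOURCE B (Python) =====
-- def parse_domains_file(file):
--     result = []
--     for line in file:
--         # character-level scanner: one pass per line, no split/replace/join chain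
--         tokens = []
--         cur = []
--         for ch in line:
--             if ch == '#':
--                 break
--             if ch == ',' or ch.isspace():
--                 if cur:
--                     tokens.append(''.join(cur))
--                     cur = []
--             else:
--                 cur.append(ch)
--         if cur:
--             tokens.append(''.join(cur))
--         if not tokens:
--             continue
--         domain = tokens[0]
--         # locate the last and second-to-last dot in one scan instead of split('.')/join
--         i = -1
--         j = -1
--         for k, ch in enumerate(domain):
--             if ch == '.':
--                 j, i = i, k
--         root = domain[j + 1:]
--         sub = domain[:j] if j >= 0 else ''
--         result.append({'root_domain': root, 'subdomain': sub,
--                        'domain': domain,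
--                        'ip': tokens[1] if len(tokens) == 2 else None})
--     return result
-- ===== Notes on version B (the rewrite author's own statement) =====
-- stated objective: alternative
-- what changed: Replaces the nine-stage split/replace/join generator pipeline with a hand-written character-level scanner (one pass per line with an explicit current-token buffer and break at '#'), and replaces the split('.')/join computation of root_domain/subdomain by a single scan recording the last two dot positions followed by two slices.
import Mathlib
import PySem

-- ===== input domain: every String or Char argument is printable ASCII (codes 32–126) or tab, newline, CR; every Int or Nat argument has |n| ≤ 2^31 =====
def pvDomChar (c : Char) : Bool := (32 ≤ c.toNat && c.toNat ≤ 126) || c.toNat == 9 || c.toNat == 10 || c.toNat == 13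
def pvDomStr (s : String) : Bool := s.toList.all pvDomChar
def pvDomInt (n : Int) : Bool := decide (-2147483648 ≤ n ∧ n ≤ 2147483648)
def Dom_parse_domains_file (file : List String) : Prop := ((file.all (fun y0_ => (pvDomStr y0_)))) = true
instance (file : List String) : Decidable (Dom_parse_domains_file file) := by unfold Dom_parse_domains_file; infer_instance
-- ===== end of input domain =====

-- B replaces A's nine-stage split/replace/join pipeline by a character-level scanner (explicit token
-- buffer, break at '#') and computes root/subdomain from the last two dot positions; objective: alternative.

-- ===== PORT A =====
-- line.split('#')[0]: the separator "#" is a nonempty literal, so Python never raises; split? is `some` and the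
-- result list is never empty, so the [0] index is total (rendered with getD/headD).
def parse_domains_file (file : List String) : List (List (String × Option String)) :=
  -- lines = (line.strip() for line in file if line.strip())
  let l1 := (file.filter (fun line => !(PySem.Str.strip line == ""))).map (fun line => PySem.Str.strip line)
  -- lines = (line.split('#')[0].strip() for line in lines)
  let l2 := l1.map (fun line => PySem.Str.strip (((PySem.Str.split? line "#").getD []).headD ""))
  -- lines = (line.replace(',', ' ') for line in lines)
  let l3 := l2.map (fun line => PySem.Str.replace line "," " ")
  -- lines = (line.replace('\t', ' ') for line in lines)
  let l4 := l3.map (fun line => PySem.Str.replace line "\t" " ")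
  -- lines = (line.replace('\n', ' ') for line in lines)
  let l5 := l4.map (fun line => PySem.Str.replace line "\n" " ")
  -- lines = (' '.join(line.split()) for line in lines)
  let l6 := l5.map (fun line => PySem.Str.join " " (PySem.Str.split₀ line))
  -- lines = (line.split(' ') for line in lines)
  let l7 := l6.map (fun line => (PySem.Str.split? line " ").getD [])
  -- lines = (line for line in lines if line[0] != '')
  let l8 := l7.filter (fun line => !(line.headD "" == ""))
  -- lines = (line if len(line) == 2 else [line[0], None] for line in lines)
  -- (a Python 2-list [str, str-or-None] rendered as a pair String × Option String)
  let l9 := l8.map (fun line =>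
    if line.length == 2 then (line.headD "", some ((line.getD 1 ""))) else (line.headD "", (none : Option String)))
  -- the final dict per line
  l9.map (fun p =>
    let parts := (PySem.Str.split? p.1 ".").getD []
    [("root_domain", some (PySem.Str.join "." (PySem.List.slice parts (some (-2)) none))),
     ("subdomain", some (PySem.Str.join "." (PySem.List.slice parts none (some (-2))))),
     ("domain", some p.1),
     ("ip", p.2)])

-- ===== PORT B =====
-- the inner character loop of Source B: `for ch in line: …` with break at '#' plus the trailing
-- `if cur: tokens.append(''.join(cur))` flush (run on break and on normal exit alike)
def pvScanB (l : List Char) (cur : List Char) (tokens : List String) : List String :=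
  match l with
  | [] => if cur.isEmpty then tokens else tokens ++ [String.ofList cur]
  | c :: t =>
    if c = '#' then (if cur.isEmpty then tokens else tokens ++ [String.ofList cur])
    else if c = ',' ∨ PySem.Chars.isspace c then
      (if cur.isEmpty then pvScanB t [] tokens else pvScanB t [] (tokens ++ [String.ofList cur]))
    else pvScanB t (cur ++ [c]) tokens

-- `for k, ch in enumerate(domain): if ch == '.': j, i = i, k`, state ji = (j, i)
def pvDotScan (l : List Char) (k : Nat) (ji : Int × Int) : Int × Int :=
  match l with
  | [] => ji
  | c :: t => pvDotScan t (k + 1) (if c = '.' then (ji.2, (k : Int)) else ji)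

def parse_domains_file_alt (file : List String) : List (List (String × Option String)) :=
  file.foldl (fun result line =>
    let tokens := pvScanB line.toList [] []
    if tokens.isEmpty then result          -- if not tokens: continue
    else
      let domain := tokens.headD ""
      let ji := pvDotScan domain.toList 0 (-1, -1)
      let j := ji.1
      let root := PySem.Str.slice domain (some (j + 1)) none        -- domain[j+1:]
      let sub := if 0 ≤ j then PySem.Str.slice domain none (some j) else ""   -- domain[:j] if j >= 0 else ''
      let ip : Option String := if tokens.length == 2 then some (tokens.getD 1 "") else none
      result ++ [[("root_domain", some root),
                  ("subdomain", some sub),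
                  ("domain", some domain),
                  ("ip", ip)]]) []

-- ===== PRECONDITION & SPEC =====
def Spec_parse_domains_file (file : List String) (out : List (List (String × Option String))) : Prop := out = parse_domains_file_alt file
instance (file : List String) (out : List (List (String × Option String))) : Decidable (Spec_parse_domains_file file out) := by unfold Spec_parse_domains_file; infer_instance

-- ===== CLAIM (what is proved, stated in full; the proofs are below) =====
def Claim_equal_parse_domains_file : Prop := ∀ (file : List String), Dom_parse_domains_file file → Spec_parse_domains_file file (parse_domains_file file)

-- ===== LEMMAS AND PROOFS =====

-- per-character view of the single-character replaces
def pvMapC (a b : Char) (c : Char) : Char := if c = a then b else c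

-- structural model of Python's whitespace split()
def pvWords : List Char → List (List Char)
  | [] => []
  | c :: t =>
    if PySem.Chars.isspace c then pvWords t
    else (c :: t.takeWhile (fun d => !PySem.Chars.isspace d)) :: pvWords (t.dropWhile (fun d => !PySem.Chars.isspace d))
termination_by l => l.length
decreasing_by
  · simp
  · have := List.length_dropWhile_le (fun d => !PySem.Chars.isspace d) t
    simp; omega

-- structural model of Python's split(sep) for a single-character sep
def pvSos (a : Char) : List Char → List (List Char)
  | [] => [[]]
  | c :: t =>
    if c = a then [] :: pvSos a t
    else
      match pvSos a t with
      | [] => [[c]]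
      | h :: r => (c :: h) :: r

lemma pvSos_ne_nil (a : Char) (l : List Char) : pvSos a l ≠ [] := by
  induction l with
  | nil => simp [pvSos]
  | cons c t ih =>
    by_cases h : c = a
    · simp [pvSos, h]
    · rcases hs : pvSos a t with _ | ⟨w, r⟩
      · exact absurd hs ih
      · simp [pvSos, h, hs]

lemma pvReplaceGo_single (a b : Char) : ∀ (l acc : List Char) (fuel : Nat), l.length ≤ fuel →
    PySem.Chars.replace.go [a] [b] fuel l acc = acc.reverse ++ l.map (pvMapC a b) := by
  intro l
  induction l with
  | nil =>
    intro acc fuel _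
    cases fuel <;> simp [PySem.Chars.replace.go]
  | cons c t ih =>
    intro acc fuel hf
    cases fuel with
    | zero => simp at hf
    | succ n =>
      have hn : t.length ≤ n := by simpa using hf
      by_cases h : a = c
      · subst h
        simp [PySem.Chars.replace.go, List.isPrefixOf, ih _ _ hn, pvMapC]
      · simp [PySem.Chars.replace.go, List.isPrefixOf, Ne.symm h, h, ih _ _ hn, pvMapC]

lemma pvReplace_single (a b : Char) (l : List Char) :
    PySem.Chars.replace l [a] [b] = l.map (pvMapC a b) := by
  simpa [PySem.Chars.replace] using pvReplaceGo_single a b l [] l.length le_rfl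

lemma pvSplit₀Go_eq (l cur : List Char) (acc : List (List Char)) :
    PySem.Chars.split₀.go l cur acc = acc.reverse ++
      (if cur.isEmpty then pvWords l
       else (cur.reverse ++ l.takeWhile (fun d => !PySem.Chars.isspace d)) ::
            pvWords (l.dropWhile (fun d => !PySem.Chars.isspace d))) := by
  induction l generalizing cur acc with
  | nil =>
    cases cur <;> simp [PySem.Chars.split₀.go, pvWords]
  | cons c t ih =>
    by_cases hs : PySem.Chars.isspace c
    · cases cur with
      | nil => simp [PySem.Chars.split₀.go, hs, ih, pvWords]
      | cons x xs => simp [PySem.Chars.split₀.go, hs, ih, pvWords, List.takeWhile, List.dropWhile]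
    · cases cur with
      | nil =>
        simp only [PySem.Chars.split₀.go, hs, Bool.false_eq_true, ih]
        simp [pvWords, hs]
      | cons x xs =>
        simp only [PySem.Chars.split₀.go, hs, Bool.false_eq_true, ih]
        simp [hs, List.takeWhile, List.dropWhile]

lemma pvSplit₀_eq (l : List Char) : PySem.Chars.split₀ l = pvWords l := by
  simp [PySem.Chars.split₀, pvSplit₀Go_eq]

lemma pvSplitOnGo_eq (a : Char) : ∀ (l : List Char) (fuel : Nat) (cur : List Char) (acc : List (List Char)), l.length ≤ fuel →
    PySem.Chars.splitOn.go [a] fuel l cur acc = acc.reverse ++ List.modifyHead (fun h => cur.reverse ++ h) (pvSos a l) := by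
  intro l
  induction l with
  | nil =>
    intro fuel cur acc _
    cases fuel <;> simp [PySem.Chars.splitOn.go, pvSos]
  | cons c t ih =>
    intro fuel cur acc hf
    cases fuel with
    | zero => simp at hf
    | succ n =>
      have hn : t.length ≤ n := by simpa using hf
      by_cases h : a = c
      · subst h
        have hstep : PySem.Chars.splitOn.go [a] (n+1) (a :: t) cur acc
            = PySem.Chars.splitOn.go [a] n t [] (cur.reverse :: acc) := by
          simp [PySem.Chars.splitOn.go, List.isPrefixOf]
        rw [hstep, ih n [] _ hn]
        rcases hs : pvSos a t with _ | ⟨x, r⟩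
        · exact absurd hs (pvSos_ne_nil a t)
        · simp [pvSos, hs]
      · rcases hs : pvSos a t with _ | ⟨w, r⟩
        · exact absurd hs (pvSos_ne_nil a t)
        · simp [PySem.Chars.splitOn.go, List.isPrefixOf, Ne.symm h, h, ih n (c :: cur) acc hn, pvSos, hs]

lemma pvSplitOn_eq (a : Char) (l : List Char) : PySem.Chars.splitOn l [a] = pvSos a l := by
  have h := pvSplitOnGo_eq a l (l.length + 1) [] [] (by omega)
  rw [PySem.Chars.splitOn, h]
  rcases hs : pvSos a l with _ | ⟨x, r⟩
  · exact absurd hs (pvSos_ne_nil a l)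
  · simp

lemma pvSos_headD (a : Char) (l : List Char) : (pvSos a l).headD [] = l.takeWhile (fun c => !(c == a)) := by
  induction l with
  | nil => simp [pvSos]
  | cons c t ih =>
    by_cases h : c = a
    · simp [pvSos, h, List.takeWhile]
    · rcases hs : pvSos a t with _ | ⟨w, r⟩
      · exact absurd hs (pvSos_ne_nil a t)
      · have hw : w = List.takeWhile (fun c => !(c == a)) t := by simpa [hs] using ih
        simp [pvSos, h, hs, hw]

lemma pvSos_nosep (a : Char) (l : List Char) (h : a ∉ l) : pvSos a l = [l] := by
  induction l with
  | nil => simp [pvSos]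
  | cons c t ih =>
    have hca : ¬ c = a := fun hh => h (by simp [hh])
    have ht : pvSos a t = [t] := ih (fun hm => h (by simp [hm]))
    simp [pvSos, hca, ht]

lemma pvSos_append (a : Char) (w l : List Char) (h : a ∉ w) :
    pvSos a (w ++ l) = List.modifyHead (fun x => w ++ x) (pvSos a l) := by
  induction w with
  | nil =>
    rcases hs : pvSos a l with _ | ⟨x, r⟩
    · exact absurd hs (pvSos_ne_nil a l)
    · simp [hs]
  | cons c w' ih =>
    have hca : ¬ c = a := fun hh => h (by simp [hh])
    have hw : a ∉ w' := fun hm => h (by simp [hm])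
    rcases hs : pvSos a l with _ | ⟨x, r⟩
    · exact absurd hs (pvSos_ne_nil a l)
    · have := ih hw
      rcases hs2 : pvSos a (w' ++ l) with _ | ⟨y, r2⟩
      · exact absurd hs2 (pvSos_ne_nil a (w' ++ l))
      · simp only [hs, hs2, List.modifyHead] at this ⊢
        simp [pvSos, hca, hs2, this]

lemma pvSos_join (a : Char) (ws : List (List Char)) (hne : ws ≠ []) (hfree : ∀ w ∈ ws, a ∉ w) :
    pvSos a (PySem.Chars.join [a] ws) = ws := by
  induction ws with
  | nil => exact absurd rfl hne
  | cons w ws' ih =>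
    cases ws' with
    | nil =>
      simp [PySem.Chars.join, List.intercalate]
      exact pvSos_nosep a w (hfree w (by simp))
    | cons w2 r =>
      have hj : PySem.Chars.join [a] (w :: w2 :: r) = w ++ a :: PySem.Chars.join [a] (w2 :: r) := by
        simp [PySem.Chars.join, List.intercalate]
      rw [hj, pvSos_append a w _ (hfree w (by simp))]
      have : pvSos a (a :: PySem.Chars.join [a] (w2 :: r)) = [] :: pvSos a (PySem.Chars.join [a] (w2 :: r)) := by
        simp [pvSos]
      rw [this, ih (by simp) (fun u hu => hfree u (by simp [hu]))]
      simp

lemma pvWords_nil_of_ws (q : List Char) (h : ∀ c ∈ q, PySem.Chars.isspace c = true) : pvWords q = [] := by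
  induction q with
  | nil => simp [pvWords]
  | cons d t ih =>
    have hd := h d (by simp)
    simp [pvWords, hd]
    exact ih (fun x hx => h x (by simp [hx]))

lemma pvWords_ws_prefix (p y : List Char) (h : ∀ c ∈ p, PySem.Chars.isspace c = true) :
    pvWords (p ++ y) = pvWords y := by
  induction p with
  | nil => simp
  | cons d t ih =>
    have hd := h d (by simp)
    simp [pvWords, hd]
    exact ih (fun x hx => h x (by simp [hx]))

lemma pvTakeWhile_nw_of_ws (q : List Char) (h : ∀ c ∈ q, PySem.Chars.isspace c = true) :
    q.takeWhile (fun d => !PySem.Chars.isspace d) = [] := by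
  cases q with
  | nil => simp
  | cons d t => simp [h d (by simp)]

lemma pvDropWhile_nw_of_ws (q : List Char) (h : ∀ c ∈ q, PySem.Chars.isspace c = true) :
    q.dropWhile (fun d => !PySem.Chars.isspace d) = q := by
  cases q with
  | nil => simp
  | cons d t => simp [h d (by simp)]

lemma pvDropWhile_nil_of_len {l : List Char} {p : Char → Bool} (h : (l.takeWhile p).length = l.length) :
    l.dropWhile p = [] := by
  have h3 := congrArg List.length (List.takeWhile_append_dropWhile (p := p) (l := l))
  rw [List.length_append, h] at h3
  exact List.eq_nil_of_length_eq_zero (by omega)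

lemma pvWords_ws_suffix (y q : List Char) (h : ∀ c ∈ q, PySem.Chars.isspace c = true) :
    pvWords (y ++ q) = pvWords y := by
  induction y using pvWords.induct with
  | case1 => simpa [pvWords] using pvWords_nil_of_ws q h
  | case2 c t hc ih => simpa [pvWords, hc] using ih
  | case3 c t hc ih =>
    simp only [List.cons_append, pvWords, hc, Bool.false_eq_true]
    rw [List.takeWhile_append, List.dropWhile_append]
    by_cases hall : (t.takeWhile (fun d => !PySem.Chars.isspace d)).length = t.length
    · have htw : t.takeWhile (fun d => !PySem.Chars.isspace d) = t :=
        (List.takeWhile_prefix _).eq_of_length hall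
      have hdw : t.dropWhile (fun d => !PySem.Chars.isspace d) = [] := pvDropWhile_nil_of_len hall
      simp [htw, hdw, pvTakeWhile_nw_of_ws q h, pvDropWhile_nw_of_ws q h,
            pvWords_nil_of_ws q h, pvWords]
    · have hne : (t.dropWhile (fun d => !PySem.Chars.isspace d)).isEmpty = false := by
        rcases hd : t.dropWhile (fun d => !PySem.Chars.isspace d) with _ | ⟨x, r⟩
        · exfalso
          have h3 := congrArg List.length (List.takeWhile_append_dropWhile
            (p := fun d => !PySem.Chars.isspace d) (l := t))
          rw [List.length_append, hd] at h3
          simp at h3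
          exact hall h3
        · simp
      simp only [hall, hne, Bool.false_eq_true, if_false]
      rw [ih]

lemma pvWords_map (f : Char → Char) (h1 : ∀ c, PySem.Chars.isspace (f c) = PySem.Chars.isspace c)
    (h2 : ∀ c, PySem.Chars.isspace c = false → f c = c) (l : List Char) :
    pvWords (l.map f) = pvWords l := by
  have hnw : (fun d => !PySem.Chars.isspace d) ∘ f = (fun d => !PySem.Chars.isspace d) := by
    funext d; simp [h1]
  induction l using pvWords.induct with
  | case1 => simp [pvWords]
  | case2 c t hc ih => simp [pvWords, h1, hc, ih]
  | case3 c t hc ih =>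
    have hcf : f c = c := h2 c (by simpa using hc)
    have htw : (t.map f).takeWhile (fun d => !PySem.Chars.isspace d)
        = t.takeWhile (fun d => !PySem.Chars.isspace d) := by
      rw [List.takeWhile_map, hnw]
      have hallid : ∀ x ∈ t.takeWhile (fun d => !PySem.Chars.isspace d), f x = id x := by
        intro x hx
        exact h2 x (by simpa using List.mem_takeWhile_imp hx)
      simpa using List.map_congr_left hallid
    have hdw : (t.map f).dropWhile (fun d => !PySem.Chars.isspace d)
        = (t.dropWhile (fun d => !PySem.Chars.isspace d)).map f := by
      rw [List.dropWhile_map, hnw]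
    simp only [List.map_cons, pvWords, hc, Bool.false_eq_true, htw, hdw, hcf]
    rw [ih]
    simp

lemma pvWords_spec (l : List Char) : ∀ u ∈ pvWords l, u ≠ [] ∧ ∀ c ∈ u, PySem.Chars.isspace c = false := by
  induction l using pvWords.induct with
  | case1 => simp [pvWords]
  | case2 c t hc ih => simpa [pvWords, hc] using ih
  | case3 c t hc ih =>
    intro u hu
    have hcons : pvWords (c :: t) = (c :: t.takeWhile (fun d => !PySem.Chars.isspace d))
        :: pvWords (t.dropWhile (fun d => !PySem.Chars.isspace d)) := by
      simp [pvWords, hc]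
    rw [hcons, List.mem_cons] at hu
    rcases hu with hu | hu
    · refine ⟨by simp [hu], ?_⟩
      intro x hx
      rw [hu] at hx
      rcases List.mem_cons.mp hx with rfl | hx
      · simpa using hc
      · simpa using List.mem_takeWhile_imp (p := fun d => !PySem.Chars.isspace d) hx
    · exact ih u hu

-- whitespace-identity maps ignore stripping (up to pvWords)
lemma pvMap_ws (f : Char → Char) (hws : ∀ c, PySem.Chars.isspace c = true → f c = c)
    (w : List Char) (hw : ∀ c ∈ w, PySem.Chars.isspace c = true) :
    ∀ c ∈ w.map f, PySem.Chars.isspace c = true := by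
  intro ch hc
  rcases List.mem_map.mp hc with ⟨x, hx, rfl⟩
  rw [hws x (hw x hx)]
  exact hw x hx

lemma pvRstrip_decomp (u : List Char) :
    ∃ q, (∀ c ∈ q, PySem.Chars.isspace c = true) ∧ u = PySem.Chars.rstrip u ++ q := by
  refine ⟨(u.reverse.takeWhile PySem.Chars.isspace).reverse, ?_, ?_⟩
  · intro ch hc
    exact List.mem_takeWhile_imp (List.mem_reverse.mp hc)
  · have h2 := congrArg List.reverse
      (List.takeWhile_append_dropWhile (p := PySem.Chars.isspace) (l := u.reverse))
    simp only [List.reverse_append, List.reverse_reverse] at h2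
    rw [PySem.Chars.rstrip]
    exact h2.symm

lemma pvLstrip_decomp (y : List Char) :
    y = y.takeWhile PySem.Chars.isspace ++ PySem.Chars.lstrip y := by
  rw [PySem.Chars.lstrip]
  exact (List.takeWhile_append_dropWhile).symm

lemma pvWords_map_strip (f : Char → Char) (hws : ∀ c, PySem.Chars.isspace c = true → f c = c)
    (y : List Char) : pvWords ((PySem.Chars.strip y).map f) = pvWords (y.map f) := by
  have hmapws := pvMap_ws f hws
  obtain ⟨q, hq, hu⟩ := pvRstrip_decomp (PySem.Chars.lstrip y)
  have hstep1 : pvWords (y.map f) = pvWords ((PySem.Chars.lstrip y).map f) := by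
    conv_lhs => rw [pvLstrip_decomp y]
    rw [List.map_append]
    exact pvWords_ws_prefix _ _ (hmapws _ (fun c hc => List.mem_takeWhile_imp hc))
  have hstep2 : pvWords ((PySem.Chars.lstrip y).map f)
      = pvWords ((PySem.Chars.rstrip (PySem.Chars.lstrip y)).map f) := by
    conv_lhs => rw [hu]
    rw [List.map_append]
    exact pvWords_ws_suffix _ _ (hmapws _ hq)
  rw [hstep1, hstep2, PySem.Chars.strip]

-- takeWhile of a whitespace-true predicate through strip: same up to all-whitespace ends
lemma pvTakeWhile_strip (P : Char → Bool) (hP : ∀ c, PySem.Chars.isspace c = true → P c = true) (y : List Char) :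
    ∃ p q, (∀ c ∈ p, PySem.Chars.isspace c = true) ∧ (∀ c ∈ q, PySem.Chars.isspace c = true) ∧
      y.takeWhile P = p ++ (PySem.Chars.strip y).takeWhile P ++ q := by
  obtain ⟨qq, hqq, hu⟩ := pvRstrip_decomp (PySem.Chars.lstrip y)
  have hp0ws : ∀ c ∈ y.takeWhile PySem.Chars.isspace, PySem.Chars.isspace c = true :=
    fun c hc => List.mem_takeWhile_imp hc
  have h1 : y.takeWhile P = y.takeWhile PySem.Chars.isspace ++ (PySem.Chars.lstrip y).takeWhile P := by
    conv_lhs => rw [pvLstrip_decomp y]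
    rw [List.takeWhile_append]
    have hp0 : (y.takeWhile PySem.Chars.isspace).takeWhile P = y.takeWhile PySem.Chars.isspace :=
      List.takeWhile_eq_self_iff.mpr (fun x hx => hP x (hp0ws x hx))
    simp [hp0]
  rw [PySem.Chars.strip]
  by_cases hc : ((PySem.Chars.rstrip (PySem.Chars.lstrip y)).takeWhile P).length
      = (PySem.Chars.rstrip (PySem.Chars.lstrip y)).length
  · have hm : (PySem.Chars.rstrip (PySem.Chars.lstrip y)).takeWhile P
        = PySem.Chars.rstrip (PySem.Chars.lstrip y) := (List.takeWhile_prefix _).eq_of_length hc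
    refine ⟨y.takeWhile PySem.Chars.isspace, qq.takeWhile P, hp0ws, ?_, ?_⟩
    · exact fun x hx => hqq x ((List.takeWhile_prefix _).mem hx)
    · rw [h1]
      conv_lhs => rw [hu]
      rw [List.takeWhile_append, hm]
      simp
  · refine ⟨y.takeWhile PySem.Chars.isspace, [], hp0ws, by simp, ?_⟩
    rw [h1]
    conv_lhs => rw [hu]
    rw [List.takeWhile_append]
    simp [hc]

-- the token lists used per line (char level): the normalized token list both programs produce
def pvToksC (cs : List Char) : List (List Char) :=
  PySem.Chars.split₀ (PySem.Chars.replace ((PySem.Chars.splitOn cs ['#']).headD []) [','] [' '])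

-- A's normalization chain produces the same token list as the one-split normal form
lemma pvTok_core (cs : List Char) :
    PySem.Chars.split₀ (PySem.Chars.replace (PySem.Chars.replace (PySem.Chars.replace
        (PySem.Chars.strip ((PySem.Chars.splitOn (PySem.Chars.strip cs) ['#']).headD []))
        [','] [' ']) ['\t'] [' ']) ['\n'] [' ']) = pvToksC cs := by
  have hwsf : ∀ c, PySem.Chars.isspace c = true → pvMapC ',' ' ' c = c := by
    intro c h
    have hne : ¬ c = ',' := by rintro rfl; exact absurd h (by decide)
    simp [pvMapC, hne]
  have h1t : ∀ c, PySem.Chars.isspace (pvMapC '\t' ' ' c) = PySem.Chars.isspace c := by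
    intro c; by_cases h : c = '\t'
    · subst h; decide
    · simp [pvMapC, h]
  have h2t : ∀ c, PySem.Chars.isspace c = false → pvMapC '\t' ' ' c = c := by
    intro c h; by_cases hc : c = '\t'
    · subst hc; exact absurd h (by decide)
    · simp [pvMapC, hc]
  have h1n : ∀ c, PySem.Chars.isspace (pvMapC '\n' ' ' c) = PySem.Chars.isspace c := by
    intro c; by_cases h : c = '\n'
    · subst h; decide
    · simp [pvMapC, h]
  have h2n : ∀ c, PySem.Chars.isspace c = false → pvMapC '\n' ' ' c = c := by
    intro c h; by_cases hc : c = '\n'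
    · subst hc; exact absurd h (by decide)
    · simp [pvMapC, hc]
  have hP : ∀ c, PySem.Chars.isspace c = true → (!(c == '#')) = true := by
    intro c h
    have hne : ¬ c = '#' := by rintro rfl; exact absurd h (by decide)
    simp [hne]
  simp only [pvToksC, pvReplace_single, pvSplit₀_eq, pvSplitOn_eq, pvSos_headD]
  rw [pvWords_map (pvMapC '\n' ' ') h1n h2n, pvWords_map (pvMapC '\t' ' ') h1t h2t,
      pvWords_map_strip _ hwsf]
  obtain ⟨p, q, hp, hq, heq⟩ := pvTakeWhile_strip (fun c => !(c == '#')) hP cs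
  rw [heq, List.map_append, List.map_append,
      pvWords_ws_suffix _ _ (pvMap_ws _ hwsf q hq), pvWords_ws_prefix _ _ (pvMap_ws _ hwsf p hp)]

-- string-level tokens
def pvToks (line : String) : List String := (pvToksC line.toList).map String.ofList

-- the record both programs build from the token list (A's form, used as the common normal form)
def pvRec (line : String) : List (String × Option String) :=
  let tokens := pvToks line
  let p := if tokens.length == 2 then (tokens.headD "", some (tokens.getD 1 "")) else (tokens.headD "", (none : Option String))
  let parts := (PySem.Str.split? p.1 ".").getD []
  [("root_domain", some (PySem.Str.join "." (PySem.List.slice parts (some (-2)) none))),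
   ("subdomain", some (PySem.Str.join "." (PySem.List.slice parts none (some (-2))))),
   ("domain", some p.1),
   ("ip", p.2)]

lemma pvStr_eq_empty (x : List Char) : (String.ofList x == "") = x.isEmpty := by
  rcases x with _ | ⟨a, t⟩
  · rfl
  · have hne : String.ofList (a :: t) ≠ "" := fun he => by
      have := congrArg String.toList he
      simp at this
    simp [hne]

lemma pvToksC_words (cs : List Char) : ∀ w ∈ pvToksC cs, w ≠ [] ∧ ∀ c ∈ w, PySem.Chars.isspace c = false := by
  intro w hw
  have hx : pvToksC cs
      = pvWords (PySem.Chars.replace ((PySem.Chars.splitOn cs ['#']).headD []) [','] [' ']) := by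
    simp [pvToksC, pvSplit₀_eq]
  rw [hx] at hw
  exact pvWords_spec _ w hw

lemma pvRound (cs : List Char) :
    PySem.Chars.splitOn (PySem.Chars.join [' '] (pvToksC cs)) [' ']
      = if (pvToksC cs).isEmpty then [[]] else pvToksC cs := by
  rcases h : pvToksC cs with _ | ⟨w, ws⟩
  · simp [PySem.Chars.join, List.intercalate, pvSplitOn_eq, pvSos]
  · rw [pvSplitOn_eq, pvSos_join ' ' _ (by simp)]
    · simp
    · intro u hu
      have hspec := pvToksC_words cs u (h ▸ hu)
      exact fun hsp => absurd (hspec.2 ' ' hsp) (by decide)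

lemma pvToksC_strip_nil (cs : List Char) (h : PySem.Chars.strip cs = []) : pvToksC cs = [] := by
  rw [← pvTok_core, h]
  simp [pvSplitOn_eq, pvSos, pvReplace_single, pvSplit₀_eq, pvWords,
        PySem.Chars.strip, PySem.Chars.lstrip, PySem.Chars.rstrip]

-- ===== B-side lemmas: the scanner equals the normal form =====

def pvG (l : List Char) : List Char := (l.takeWhile (fun c => !(c == '#'))).map (pvMapC ',' ' ')

lemma pvToksC_eq_words_pvG (cs : List Char) : pvToksC cs = pvWords (pvG cs) := by
  simp only [pvToksC, pvReplace_single, pvSplit₀_eq, pvSplitOn_eq, pvSos_headD, pvG]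

lemma pvWords_single (w : List Char) (hne : w ≠ []) (h : ∀ c ∈ w, PySem.Chars.isspace c = false) :
    pvWords w = [w] := by
  rcases w with _ | ⟨c, t⟩
  · exact absurd rfl hne
  · have hc := h c (by simp)
    have htw : t.takeWhile (fun d => !PySem.Chars.isspace d) = t :=
      List.takeWhile_eq_self_iff.mpr (fun x hx => by simp [h x (by simp [hx])])
    have hdw : t.dropWhile (fun d => !PySem.Chars.isspace d) = [] := by
      apply pvDropWhile_nil_of_len
      rw [htw]
    simp [pvWords, hc, htw, hdw]

lemma pvWords_word_space (w : List Char) (s : Char) (rest : List Char)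
    (h : ∀ c ∈ w, PySem.Chars.isspace c = false) (hs : PySem.Chars.isspace s = true) :
    pvWords (w ++ s :: rest) = (if w.isEmpty then [] else [w]) ++ pvWords rest := by
  rcases w with _ | ⟨c, t⟩
  · simp [pvWords, hs]
  · have hc := h c (by simp)
    have htw : t.takeWhile (fun d => !PySem.Chars.isspace d) = t :=
      List.takeWhile_eq_self_iff.mpr (fun x hx => by simp [h x (by simp [hx])])
    have htws : (t ++ s :: rest).takeWhile (fun d => !PySem.Chars.isspace d) = t := by
      rw [List.takeWhile_append, htw]
      simp [hs]
    have hdws : (t ++ s :: rest).dropWhile (fun d => !PySem.Chars.isspace d) = s :: rest := by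
      rw [List.dropWhile_append]
      have : t.dropWhile (fun d => !PySem.Chars.isspace d) = [] := by
        apply pvDropWhile_nil_of_len; rw [htw]
      simp [this, hs]
    simp [pvWords, hc, htws, hdws, hs]

lemma pvScanB_eq (l : List Char) : ∀ (cur : List Char) (tokens : List String),
    (∀ c ∈ cur, PySem.Chars.isspace c = false) →
    pvScanB l cur tokens = tokens ++ (pvWords (cur ++ pvG l)).map String.ofList := by
  induction l with
  | nil =>
    intro cur tokens hcur
    have hg : pvG ([] : List Char) = [] := by simp [pvG]
    rcases hc : cur with _ | ⟨a, t⟩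
    · simp [pvScanB, hg, pvWords]
    · rw [pvScanB, hg, List.append_nil, pvWords_single _ (by simp) (hc ▸ hcur)]
      simp
  | cons c t ih =>
    intro cur tokens hcur
    by_cases hh : c = '#'
    · subst hh
      have hgl : pvG ('#' :: t) = [] := by
        unfold pvG
        rw [List.takeWhile_cons_of_neg (by simp)]
        rfl
      rcases hc : cur with _ | ⟨a, u⟩
      · simp [pvScanB, hgl, pvWords]
      · rw [pvScanB, if_pos rfl, hgl, List.append_nil,
            pvWords_single _ (by simp) (hc ▸ hcur)]
        simp
    · by_cases hd : c = ',' ∨ PySem.Chars.isspace c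
      · have hgl : pvG (c :: t) = pvMapC ',' ' ' c :: pvG t := by
          unfold pvG
          rw [List.takeWhile_cons_of_pos (by simp [hh])]
          rfl
        have hsp : PySem.Chars.isspace (pvMapC ',' ' ' c) = true := by
          rcases hd with hd | hd
          · subst hd; decide
          · have hcne : ¬ c = ',' := fun hcc => by subst hcc; exact absurd hd (by decide)
            simpa [pvMapC, hcne] using hd
        rw [pvScanB]
        simp only [hh, if_false, hd, if_true]
        rw [hgl, pvWords_word_space cur _ (pvG t) hcur hsp]
        rcases hc : cur with _ | ⟨a, u⟩
        · rw [ih [] tokens (by simp)]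
          simp
        · rw [ih [] (tokens ++ [String.ofList (a :: u)]) (by simp)]
          simp
      · push_neg at hd
        have hcc : ¬ c = ',' := hd.1
        have hcs : PySem.Chars.isspace c = false := by simpa using hd.2
        have hgl : pvG (c :: t) = c :: pvG t := by
          unfold pvG
          rw [List.takeWhile_cons_of_pos (by simp [hh])]
          simp [pvMapC, hcc]
        rw [pvScanB]
        simp only [hh, if_false]
        have hdd : ¬ (c = ',' ∨ PySem.Chars.isspace c) := by
          rintro (h1 | h1)
          · exact hcc h1
          · rw [hcs] at h1; exact absurd h1 (by simp)
        simp only [hdd, if_false]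
        rw [ih (cur ++ [c]) tokens (by
          intro x hx
          rcases List.mem_append.mp hx with hx | hx
          · exact hcur x hx
          · simpa using (List.mem_singleton.mp hx) ▸ hcs)]
        rw [hgl]
        simp

lemma pvScanB_toks (line : String) :
    pvScanB line.toList [] [] = (pvToksC line.toList).map String.ofList := by
  rw [pvScanB_eq line.toList [] [] (by simp), pvToksC_eq_words_pvG]
  simp

-- ===== B-side lemmas: the dot scan equals split('.')/join slices =====

lemma pvSos_dotfree (a : Char) (l : List Char) : ∀ w ∈ pvSos a l, a ∉ w := by
  induction l with
  | nil => simp [pvSos]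
  | cons c t ih =>
    by_cases h : c = a
    · intro w hw
      rw [pvSos, if_pos h] at hw
      rcases List.mem_cons.mp hw with rfl | hw
      · simp
      · exact ih w hw
    · intro w hw
      rcases hs : pvSos a t with _ | ⟨x, r⟩
      · exact absurd hs (pvSos_ne_nil a t)
      · rw [pvSos, if_neg h, hs] at hw
        rcases List.mem_cons.mp hw with rfl | hw
        · have hx : a ∉ x := ih x (by simp [hs])
          simp [Ne.symm h, hx]
        · exact ih w (by simp [hs, hw])

lemma pvJoin_cons₂ (a : Char) (x y : List Char) (zs : List (List Char)) :
    PySem.Chars.join [a] (x :: y :: zs) = x ++ a :: PySem.Chars.join [a] (y :: zs) := by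
  simp [PySem.Chars.join, List.intercalate]

lemma pvJoin_single (a : Char) (w : List Char) : PySem.Chars.join [a] [w] = w := by
  simp [PySem.Chars.join, List.intercalate]

lemma pvJoin_len₁ (a : Char) (x : List Char) : (PySem.Chars.join [a] [x]).length = x.length := by
  rw [pvJoin_single]

lemma pvJoin_len₂ (a : Char) (x y : List Char) (zs : List (List Char)) :
    (PySem.Chars.join [a] (x :: y :: zs)).length = x.length + 1 + (PySem.Chars.join [a] (y :: zs)).length := by
  rw [pvJoin_cons₂]
  simp only [List.length_append, List.length_cons]
  omega

lemma pvJoin_pvSos (a : Char) (l : List Char) : PySem.Chars.join [a] (pvSos a l) = l := by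
  induction l with
  | nil => simp [pvSos, PySem.Chars.join, List.intercalate]
  | cons c t ih =>
    by_cases h : c = a
    · subst h
      rw [pvSos, if_pos rfl]
      rcases hs : pvSos c t with _ | ⟨x, r⟩
      · exact absurd hs (pvSos_ne_nil c t)
      · rw [pvJoin_cons₂]
        rw [hs] at ih
        rw [ih]
        simp
    · rcases hs : pvSos a t with _ | ⟨x, r⟩
      · exact absurd hs (pvSos_ne_nil a t)
      · rw [pvSos, if_neg h, hs]
        rw [hs] at ih
        rcases r with _ | ⟨y, r'⟩
        · rw [pvJoin_single]
          rw [pvJoin_single] at ih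
          rw [ih]
        · rw [pvJoin_cons₂] at ih ⊢
          rw [List.cons_append, ih]

lemma pvJoin_split (a : Char) (xs ys : List (List Char)) (hx : xs ≠ []) (hy : ys ≠ []) :
    PySem.Chars.join [a] (xs ++ ys) = PySem.Chars.join [a] xs ++ a :: PySem.Chars.join [a] ys := by
  induction xs with
  | nil => exact absurd rfl hx
  | cons w ws ih =>
    rcases ws with _ | ⟨w2, ws'⟩
    · rcases ys with _ | ⟨y, ys'⟩
      · exact absurd rfl hy
      · rw [(by simp : ([w] : List (List Char)) ++ y :: ys' = w :: y :: ys'), pvJoin_cons₂,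
            pvJoin_single]
    · have hstep : (w :: w2 :: ws') ++ ys = w :: w2 :: (ws' ++ ys) := by simp
      rw [hstep, pvJoin_cons₂]
      have hstep2 : (w2 : List Char) :: (ws' ++ ys) = (w2 :: ws') ++ ys := by simp
      rw [hstep2, ih (by simp), pvJoin_cons₂]
      simp

lemma pvDotScan_word (w : List Char) : ∀ (rest : List Char) (k : Nat) (ji : Int × Int),
    '.' ∉ w → pvDotScan (w ++ rest) k ji = pvDotScan rest (k + w.length) ji := by
  induction w with
  | nil => intro rest k ji _; simp [pvDotScan]
  | cons c t ih =>
    intro rest k ji h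
    have hc : ¬ c = '.' := fun hh => h (by simp [hh])
    rw [List.cons_append, pvDotScan, if_neg hc, ih rest (k+1) ji (fun hm => h (by simp [hm]))]
    have hlen : k + 1 + t.length = k + (c :: t).length := by
      simp only [List.length_cons]
      omega
    rw [hlen]

lemma pvDotScan_nodot (w : List Char) (k : Nat) (ji : Int × Int) (h : '.' ∉ w) :
    pvDotScan w k ji = ji := by
  have := pvDotScan_word w [] k ji h
  simpa [pvDotScan] using this

lemma pvDotScan_dot (t : List Char) (k : Nat) (j i : Int) :
    pvDotScan ('.' :: t) k (j, i) = pvDotScan t (k + 1) (i, (k : Int)) := by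
  rw [pvDotScan, if_pos rfl]

lemma pvDotScan_main : ∀ (rest : List (List Char)) (u v : List Char) (k : Nat) (j i : Int),
    '.' ∉ u → '.' ∉ v → (∀ w ∈ rest, '.' ∉ w) →
    pvDotScan (PySem.Chars.join ['.'] (u :: v :: rest)) k (j, i) =
      ((if rest.isEmpty then i
        else (((k + (PySem.Chars.join ['.'] ((u :: v :: rest).dropLast.dropLast)).length : Nat) : Int))),
       ((k + (PySem.Chars.join ['.'] ((u :: v :: rest).dropLast)).length : Nat) : Int)) := by
  intro rest
  induction rest with
  | nil =>
    intro u v k j i hu hv _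
    rw [pvJoin_cons₂, pvDotScan_word u _ k (j, i) hu, pvDotScan_dot,
        pvJoin_single, pvDotScan_nodot v _ _ hv]
    simp [List.dropLast, pvJoin_single]
  | cons r rs ih =>
    intro u v k j i hu hv hrest
    rw [pvJoin_cons₂, pvDotScan_word u _ k (j, i) hu, pvDotScan_dot,
        ih v r (k + u.length + 1) i ((k + u.length : Nat) : Int) hv (hrest r (by simp))
          (fun w hw => hrest w (by simp [hw]))]
    have hdl1 : (u :: v :: r :: rs).dropLast = u :: (v :: r :: rs).dropLast := by
      simp [List.dropLast]
    have hdl2 : (v :: r :: rs).dropLast = v :: (r :: rs).dropLast := by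
      simp [List.dropLast]
    rcases rs with _ | ⟨r2, rs'⟩
    · simp only [List.isEmpty_nil, List.isEmpty_cons, if_true, Bool.false_eq_true, if_false]
      rw [Prod.mk.injEq]
      constructor
      · simp [List.dropLast, pvJoin_single]
      · rw [hdl1, hdl2]
        simp only [List.dropLast, pvJoin_len₂, pvJoin_len₁]
        push_cast
        ring
    · simp only [List.isEmpty_cons, Bool.false_eq_true, if_false]
      have hdl3 : (r :: r2 :: rs').dropLast = r :: (r2 :: rs').dropLast := by
        simp [List.dropLast]
    /- first components need join over (…).dropLast.dropLast; expose one cons layer at a time -/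
      rw [Prod.mk.injEq]
      constructor
      · rw [hdl1, hdl2, hdl3]
        rcases hdd : ((r2 :: rs').dropLast) with _ | ⟨z, zs⟩
        · simp only [List.dropLast, hdd, pvJoin_len₂, pvJoin_len₁]
          push_cast
          ring
        · simp only [List.dropLast, hdd, pvJoin_len₂, pvJoin_len₁]
          push_cast
          ring
      · rw [hdl1, hdl2, hdl3]
        simp only [pvJoin_len₂, pvJoin_len₁]
        push_cast
        ring

-- the char-level root/sub slices computed by the dot scan agree with A's slice-of-parts joins
lemma pvDot_root_sub (cs : List Char) :
    (PySem.List.slice cs (some ((pvDotScan cs 0 (-1, -1)).1 + 1)) none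
        = PySem.Chars.join ['.'] (PySem.List.slice (pvSos '.' cs) (some (-2)) none)) ∧
    ((if (0:Int) ≤ (pvDotScan cs 0 (-1, -1)).1 then PySem.List.slice cs none (some (pvDotScan cs 0 (-1, -1)).1) else [])
        = PySem.Chars.join ['.'] (PySem.List.slice (pvSos '.' cs) none (some (-2)))) := by
  have hfree := pvSos_dotfree '.' cs
  have hjoin := pvJoin_pvSos '.' cs
  rcases hp : pvSos '.' cs with _ | ⟨u, ps⟩
  · exact absurd hp (pvSos_ne_nil '.' cs)
  · rw [hp] at hfree hjoin
    rcases ps with _ | ⟨v, rest⟩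
    · -- one part: no dot in cs
      rw [pvJoin_single] at hjoin
      subst hjoin
      have hscan : pvDotScan u 0 (-1, -1) = (-1, -1) :=
        pvDotScan_nodot u 0 (-1, -1) (hfree u (by simp))
      rw [hscan]
      constructor
      · rw [(by norm_num : (-1 : Int) + 1 = ((0:Nat) : Int)), PySem.List.slice_from_natCast,
            PySem.List.slice_from_neg_ofNat _ 2 (by omega)]
        simp [pvJoin_single]
      · rw [if_neg (by norm_num), PySem.List.slice_to_neg_ofNat _ 2 (by omega)]
        simp [PySem.Chars.join, List.intercalate]
    · rcases rest with _ | ⟨r, rs⟩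
      · -- two parts
        have hscan : pvDotScan cs 0 (-1, -1) = (-1, ((u.length : Nat) : Int)) := by
          rw [← hjoin, pvDotScan_main [] u v 0 (-1) (-1) (hfree u (by simp)) (hfree v (by simp)) (by simp)]
          simp [List.dropLast, pvJoin_single]
        rw [hscan]
        constructor
        · rw [(by norm_num : (-1 : Int) + 1 = ((0:Nat) : Int)), PySem.List.slice_from_natCast,
              PySem.List.slice_from_neg_ofNat _ 2 (by omega)]
          simp [hjoin]
        · rw [if_neg (by norm_num), PySem.List.slice_to_neg_ofNat _ 2 (by omega)]
          simp [PySem.Chars.join, List.intercalate]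
      · -- at least three parts
        have hscan : pvDotScan cs 0 (-1, -1) =
            ((((PySem.Chars.join ['.'] ((u :: v :: r :: rs).dropLast.dropLast)).length : Nat) : Int),
             (((PySem.Chars.join ['.'] ((u :: v :: r :: rs).dropLast)).length : Nat) : Int)) := by
          rw [← hjoin, pvDotScan_main (r :: rs) u v 0 (-1) (-1) (hfree u (by simp)) (hfree v (by simp))
              (fun w hw => hfree w (by simp [hw]))]
          simp
        rw [hscan]
        have hlen : (u :: v :: r :: rs).length = rs.length + 3 := by simp
        have hd1 : (u :: v :: r :: rs).dropLast = (u :: v :: r :: rs).take ((u :: v :: r :: rs).length - 1) :=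
          List.dropLast_eq_take
        have hd2 : (u :: v :: r :: rs).dropLast.dropLast
            = (u :: v :: r :: rs).take ((u :: v :: r :: rs).length - 2) := by
          rw [List.dropLast_eq_take, List.dropLast_eq_take, List.take_take, List.length_take]
          congr 1
          omega
        have htk_ne : (u :: v :: r :: rs).take ((u :: v :: r :: rs).length - 2) ≠ [] := by
          intro hnil
          have := congrArg List.length hnil
          rw [List.length_take] at this
          simp at this
        have hdr_ne : (u :: v :: r :: rs).drop ((u :: v :: r :: rs).length - 2) ≠ [] := by
          intro hnil
          have := congrArg List.length hnil
          rw [List.length_drop] at this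
          simp at this
        have hsplit : cs = PySem.Chars.join ['.'] ((u :: v :: r :: rs).take ((u :: v :: r :: rs).length - 2)) ++
            '.' :: PySem.Chars.join ['.'] ((u :: v :: r :: rs).drop ((u :: v :: r :: rs).length - 2)) := by
          rw [← hjoin]
          conv_lhs => rw [(List.take_append_drop ((u :: v :: r :: rs).length - 2) (u :: v :: r :: rs)).symm]
          exact pvJoin_split '.' _ _ htk_ne hdr_ne
        set A := PySem.Chars.join ['.'] ((u :: v :: r :: rs).take ((u :: v :: r :: rs).length - 2)) with hA
        constructor
        · rw [(by push_cast; ring :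
              (((PySem.Chars.join ['.'] ((u :: v :: r :: rs).dropLast.dropLast)).length : Int) + 1)
                = (((PySem.Chars.join ['.'] ((u :: v :: r :: rs).dropLast.dropLast)).length + 1 : Nat) : Int)),
            PySem.List.slice_from_natCast, PySem.List.slice_from_neg_ofNat _ 2 (by omega), hsplit, hd2]
          rw [(by simp : A ++ '.' :: PySem.Chars.join ['.'] ((u :: v :: r :: rs).drop ((u :: v :: r :: rs).length - 2))
                = (A ++ ['.']) ++ PySem.Chars.join ['.'] ((u :: v :: r :: rs).drop ((u :: v :: r :: rs).length - 2)))]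
          rw [(by rw [List.length_append]; simp : A.length + 1 = (A ++ ['.']).length)]
          rw [List.drop_left]
        · rw [if_pos (by positivity), PySem.List.slice_to _ (by positivity),
              PySem.List.slice_to_neg_ofNat _ 2 (by omega), hsplit, hd2]
          rw [(by simp : ((((A.length : Nat) : Int)).toNat) = A.length)]
          rw [List.take_left]

-- slices of a mapped list (used to move string-level slices to char level)
lemma pvSliceMap_from {α β : Type} (f : α → β) (ps : List α) :
    PySem.List.slice (ps.map f) (some (-2)) none = (PySem.List.slice ps (some (-2)) none).map f := by
  rw [PySem.List.slice_from_neg_ofNat _ 2 (by omega), PySem.List.slice_from_neg_ofNat _ 2 (by omega)]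
  simp [List.map_drop]

lemma pvSliceMap_to {α β : Type} (f : α → β) (ps : List α) :
    PySem.List.slice (ps.map f) none (some (-2)) = (PySem.List.slice ps none (some (-2))).map f := by
  rw [PySem.List.slice_to_neg_ofNat _ 2 (by omega), PySem.List.slice_to_neg_ofNat _ 2 (by omega)]
  simp [List.map_take]

lemma pvStr_eq_of_toList {a b : String} (h : a.toList = b.toList) : a = b := by
  have := congrArg String.ofList h
  simpa using this

-- string-level root/sub equalities for one token
lemma pvRoot_str (w : List Char) :
    PySem.Str.slice (String.ofList w) (some ((pvDotScan (String.ofList w).toList 0 (-1, -1)).1 + 1)) none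
      = PySem.Str.join "." (PySem.List.slice ((pvSos '.' w).map String.ofList) (some (-2)) none) := by
  have hdom : (String.ofList w).toList = w := by simp
  apply pvStr_eq_of_toList
  have c1 : ("." : String).toList = ['.'] := rfl
  rw [PySem.Str.toList_slice, PySem.Str.toList_join, c1, pvSliceMap_from]
  rw [PySem.Chars.slice_eq_listSlice, hdom]
  have hmm : ((PySem.List.slice (pvSos '.' w) (some (-2)) none).map String.ofList).map String.toList
      = PySem.List.slice (pvSos '.' w) (some (-2)) none := by
    simp [List.map_map, Function.comp_def]
  rw [hmm]
  exact (pvDot_root_sub w).1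

lemma pvSub_str (w : List Char) :
    (if 0 ≤ (pvDotScan (String.ofList w).toList 0 (-1, -1)).1 then
        PySem.Str.slice (String.ofList w) none (some (pvDotScan (String.ofList w).toList 0 (-1, -1)).1)
      else "")
      = PySem.Str.join "." (PySem.List.slice ((pvSos '.' w).map String.ofList) none (some (-2))) := by
  have hdom : (String.ofList w).toList = w := by simp
  apply pvStr_eq_of_toList
  have hrhs : (PySem.Str.join "." (PySem.List.slice ((pvSos '.' w).map String.ofList) none (some (-2)))).toList
      = PySem.Chars.join ['.'] (PySem.List.slice (pvSos '.' w) none (some (-2))) := by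
    have c1 : ("." : String).toList = ['.'] := rfl
    rw [PySem.Str.toList_join, c1, pvSliceMap_to]
    have hmm : ((PySem.List.slice (pvSos '.' w) none (some (-2))).map String.ofList).map String.toList
        = PySem.List.slice (pvSos '.' w) none (some (-2)) := by
      simp [List.map_map, Function.comp_def]
    rw [hmm]
  rw [hrhs, ← (pvDot_root_sub w).2, hdom]
  by_cases hj : (0:Int) ≤ (pvDotScan w 0 (-1, -1)).1
  · rw [if_pos hj, if_pos hj, PySem.Str.toList_slice, PySem.Chars.slice_eq_listSlice, hdom]
  · rw [if_neg hj, if_neg hj]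
    rfl

-- B's per-line record equals pvRec once the token list is known
lemma pvRecB_eq (line : String) (w : List Char) (ws : List (List Char))
    (hp : pvToksC line.toList = w :: ws) :
    [(("root_domain" : String), some (PySem.Str.slice (String.ofList w)
         (some ((pvDotScan (String.ofList w).toList 0 (-1, -1)).1 + 1)) none)),
     ("subdomain", some (if 0 ≤ (pvDotScan (String.ofList w).toList 0 (-1, -1)).1 then
         PySem.Str.slice (String.ofList w) none (some (pvDotScan (String.ofList w).toList 0 (-1, -1)).1)
       else "")),
     ("domain", some (String.ofList w)),
     ("ip", if (((w :: ws).map String.ofList).length == 2) = true then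
         some (((w :: ws).map String.ofList).getD 1 "") else none)] = pvRec line := by
  have hpartsL : ((PySem.Str.split? (String.ofList w) ".").getD []) = (pvSos '.' w).map String.ofList := by
    have c1 : ("." : String).toList = ['.'] := rfl
    simp [PySem.Str.split?, PySem.Chars.split?, c1, pvSplitOn_eq]
  simp only [pvRec, pvToks, hp, List.map_cons]
  have hfst : (if ((String.ofList w :: ws.map String.ofList).length == 2) = true then
      (String.ofList w :: ws.map String.ofList |>.headD "",
        some ((String.ofList w :: ws.map String.ofList).getD 1 ""))
    else ((String.ofList w :: ws.map String.ofList).headD "", (none : Option String))).1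
      = String.ofList w := by
    split <;> rfl
  have hsnd : (if ((String.ofList w :: ws.map String.ofList).length == 2) = true then
      (String.ofList w :: ws.map String.ofList |>.headD "",
        some ((String.ofList w :: ws.map String.ofList).getD 1 ""))
    else ((String.ofList w :: ws.map String.ofList).headD "", (none : Option String))).2
      = if ((String.ofList w :: ws.map String.ofList).length == 2) = true then
          some ((String.ofList w :: ws.map String.ofList).getD 1 "") else none := by
    split <;> rfl
  simp only [hfst, hsnd, hpartsL]
  rw [pvRoot_str, pvSub_str]

-- ===== assembling the two programs to the common normal form =====

-- A's per-line normalization composite and per-token-list record, named for the assembly proof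
def pvALine (line : String) : List String :=
  (PySem.Str.split? (PySem.Str.join " " (PySem.Str.split₀ (PySem.Str.replace (PySem.Str.replace
      (PySem.Str.replace (PySem.Str.strip (((PySem.Str.split? (PySem.Str.strip line) "#").getD []).headD ""))
      "," " ") "\t" " ") "\n" " "))) " ").getD []

def pvARec (t : List String) : List (String × Option String) :=
  let p := if t.length == 2 then (t.headD "", some (t.getD 1 "")) else (t.headD "", (none : Option String))
  let parts := (PySem.Str.split? p.1 ".").getD []
  [("root_domain", some (PySem.Str.join "." (PySem.List.slice parts (some (-2)) none))),
   ("subdomain", some (PySem.Str.join "." (PySem.List.slice parts none (some (-2))))),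
   ("domain", some p.1),
   ("ip", p.2)]

lemma pvLineA (line : String) :
    pvALine line
      = if (pvToksC line.toList).isEmpty then [""] else (pvToksC line.toList).map String.ofList := by
  have c1 : ("#" : String).toList = ['#'] := rfl
  have c2 : ("," : String).toList = [','] := rfl
  have c3 : (" " : String).toList = [' '] := rfl
  have c4 : ("\t" : String).toList = ['\t'] := rfl
  have c5 : ("\n" : String).toList = ['\n'] := rfl
  have hmm : ∀ (L : List (List Char)), (L.map String.ofList).map String.toList = L := by
    intro L
    simp [List.map_map, Function.comp_def, String.toList_ofList]
  simp [pvALine, PySem.Str.split?, PySem.Str.strip, PySem.Str.replace, PySem.Str.split₀,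
    PySem.Str.join, PySem.Chars.split?, String.toList_ofList,
    c1, c2, c3, c4, c5, hmm]
  have htc := pvTok_core line.toList
  simp only [List.headD_eq_head?_getD] at htc
  rw [htc, pvRound line.toList]
  rcases h : pvToksC line.toList with _ | ⟨w, ws⟩
  · simp
  · simp

lemma pvStrip_empty_iff (line : String) :
    (PySem.Str.strip line == "") = (PySem.Chars.strip line.toList).isEmpty := by
  have hs : PySem.Str.strip line = String.ofList (PySem.Chars.strip line.toList) := rfl
  rw [hs, pvStr_eq_empty]

lemma pvA_unfold (file : List String) :
    parse_domains_file file =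
      (((file.filter (fun l => !(PySem.Str.strip l == ""))).map pvALine).filter
        (fun t => !(t.headD "" == ""))).map pvARec := by
  simp [parse_domains_file, pvALine, pvARec, List.map_map, List.filter_map, Function.comp_def]

lemma pvA_chain (file : List String) :
    parse_domains_file file = (file.filter (fun l => !(pvToksC l.toList).isEmpty)).map pvRec := by
  induction file with
  | nil => simp [pvA_unfold]
  | cons a t ih =>
    rw [pvA_unfold]
    rw [pvA_unfold] at ih
    by_cases h1 : (PySem.Str.strip a == "") = true
    · have htoks : pvToksC a.toList = [] := by
        apply pvToksC_strip_nil
        rw [pvStrip_empty_iff] at h1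
        exact List.isEmpty_iff.mp h1
      simp only [List.filter_cons, h1, Bool.not_true, Bool.false_eq_true, if_false, htoks,
        List.isEmpty_nil]
      exact ih
    · have hline := pvLineA a
      rcases h : pvToksC a.toList with _ | ⟨w, ws⟩
      · rw [h] at hline
        simp only [List.isEmpty_nil, if_true] at hline
        simp only [List.filter_cons, h1, Bool.not_false, if_true, List.map_cons, hline, h]
        simp only [List.headD_cons, List.isEmpty_nil, Bool.not_true, Bool.false_eq_true, if_false]
        have : (("" : String) == "") = true := rfl
        simp only [this, Bool.not_true, Bool.false_eq_true, if_false]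
        exact ih
      · rw [h] at hline
        simp only [List.isEmpty_cons, if_false, Bool.false_eq_true] at hline
        have hw : w ≠ [] := (pvToksC_words a.toList w (by simp [h])).1
        have hhd : (String.ofList w == "") = false := by
          rw [pvStr_eq_empty]
          simpa using hw
        simp only [List.filter_cons, h1, Bool.not_false, if_true, List.map_cons, hline, h,
          List.map_cons, List.headD_cons, hhd, List.isEmpty_cons]
        rw [ih]
        have hrec : pvARec (String.ofList w :: ws.map String.ofList) = pvRec a := by
          simp only [pvARec, pvRec, pvToks, h, List.map_cons]
        rw [hrec]

lemma pvB_chain (file : List String) :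
    parse_domains_file_alt file = (file.filter (fun l => !(pvToksC l.toList).isEmpty)).map pvRec := by
  rw [parse_domains_file_alt]
  have hbody : (fun (result : List (List (String × Option String))) (line : String) =>
      let tokens := pvScanB line.toList [] []
      if tokens.isEmpty then result
      else
        let domain := tokens.headD ""
        let ji := pvDotScan domain.toList 0 (-1, -1)
        let j := ji.1
        let root := PySem.Str.slice domain (some (j + 1)) none
        let sub := if 0 ≤ j then PySem.Str.slice domain none (some j) else ""
        let ip : Option String := if tokens.length == 2 then some (tokens.getD 1 "") else none
        result ++ [[("root_domain", some root), ("subdomain", some sub),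
                    ("domain", some domain), ("ip", ip)]])
      = (fun result line => if (!(pvToksC line.toList).isEmpty) = true then result ++ [pvRec line] else result) := by
    funext result line
    rcases hp : pvToksC line.toList with _ | ⟨w, ws⟩
    · simp [pvScanB_toks, hp]
    · simp only [pvScanB_toks, hp, List.map_cons, List.isEmpty_cons, Bool.not_false, if_true,
        Bool.false_eq_true, if_false, List.headD_cons]
      rw [← pvRecB_eq line w ws hp]
      simp
  rw [hbody, PySem.List.foldl_append_if]
  simp

-- ===== VERDICT (by name: the statement is the Claim_ definition above) =====
theorem parse_domains_file_spec : Claim_equal_parse_domains_file := by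
  intro file _
  unfold Spec_parse_domains_file
  rw [pvA_chain, pvB_chain]
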